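-- pv_equiv track=rewrite | github.com/Kyutzy/MaquinaEstadosFinitos | mef.py | recebeA
-- ===== SOURCE A (Python) =====
-- def recebeA(a:str):
--     for letra in range(len(list(a))):
--         if a[letra] == 'a':
--             if recebeB(a, letra):
--                 pass
--             else:
--                 return f"{a}: Não Pertence"
--     return f"{a}: Pertence"
--
-- def recebeB(b, num):
--     try:
--         if b[num] == 'b':
--             return f"{b}: não pertence"
--         elif b[num+1] == 'b' and b[num+2] == 'b':
--             return True
--         return False
--     except IndexError:
--         return False
-- ===== SOURCE B (Python) =====
-- def recebeA(a: str):
--     # single left-to-right pass: 'owe' counts how many 'b's are still owed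
--     # after an 'a' (every 'a' must be immediately followed by "bb")
--     owe = 0
--     for c in a:
--         if owe > 0:
--             if c == 'b':
--                 owe -= 1
--             else:
--                 return f"{a}: Não Pertence"
--         elif c == 'a':
--             owe = 2
--     return f"{a}: Pertence" if owe == 0 else f"{a}: Não Pertence"
-- ===== Notes on version B (the rewrite author's own statement) =====
-- stated objective: alternative
-- what changed: Replaced the index loop with per-occurrence two-character lookahead via the recebeB helper by a single-pass finite-state scan over the characters that tracks how many required follow-up characters are still pending; no helper, no random-access indexing, no try/except.
import Mathlib
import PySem

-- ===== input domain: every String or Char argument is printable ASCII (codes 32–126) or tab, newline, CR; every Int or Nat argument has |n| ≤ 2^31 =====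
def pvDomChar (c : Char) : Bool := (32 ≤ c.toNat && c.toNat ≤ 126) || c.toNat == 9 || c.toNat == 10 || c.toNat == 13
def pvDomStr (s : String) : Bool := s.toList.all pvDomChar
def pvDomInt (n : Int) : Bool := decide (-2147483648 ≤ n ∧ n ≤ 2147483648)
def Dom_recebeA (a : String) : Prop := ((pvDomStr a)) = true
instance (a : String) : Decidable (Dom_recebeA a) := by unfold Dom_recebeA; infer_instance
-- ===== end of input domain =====

-- B replaces A's index loop + recebeB lookahead helper by a single-pass state scan
-- ('how many b's are still owed'); same O(n) cost, no helper / indexing / try-except.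

-- ===== PORT A =====
-- recebeB: Python returns a (truthy, nonempty) string in the first branch and a bool
-- otherwise; only its truthiness is ever used, so the port returns Bool with 'true'
-- for that string branch (exact for every caller, which tests truthiness).
-- The try/except IndexError is ported by pyGet?: none (IndexError) yields 'false'.
def recebeB_port (b : List Char) (num : Int) : Bool :=
  match PySem.List.pyGet? b num with
  | none => false                               -- b[num] raised: except → return False
  | some c =>
    if c = 'b' then true                        -- returns the nonempty string (truthy)
    else if PySem.List.pyGet? b (num + 1) = some 'b' then
      (if PySem.List.pyGet? b (num + 2) = some 'b' then true else false)
    else false                                  -- 'and' short-circuit / IndexError → False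

-- the 'for letra in range(len(list(a)))' loop with its early return
def recebeA_loop (s : List Char) (msg : String) : List Int → Option String
  | [] => none
  | i :: rest =>
    if PySem.List.pyGet? s i = some 'a' then
      (if recebeB_port s i then recebeA_loop s msg rest else some msg)
    else recebeA_loop s msg rest

def recebeA (a : String) : String :=
  match recebeA_loop a.toList (a ++ ": Não Pertence")
      (PySem.List.pyRange 0 (a.toList.length : Int) 1) with
  | some r => r
  | none => a ++ ": Pertence"

-- ===== PORT B =====
-- the for-loop of Source B: state 'owe'; none = the early return inside the loop,
-- some owe = the loop finished with that state
def recebeA_alt_loop (owe : Nat) : List Char → Option Nat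
  | [] => some owe
  | c :: t =>
    if owe > 0 then
      (if c = 'b' then recebeA_alt_loop (owe - 1) t else none)
    else if c = 'a' then recebeA_alt_loop 2 t
    else recebeA_alt_loop owe t

def recebeA_alt (a : String) : String :=
  match recebeA_alt_loop 0 a.toList with
  | none => a ++ ": Não Pertence"
  | some owe => if owe = 0 then a ++ ": Pertence" else a ++ ": Não Pertence"

-- ===== PRECONDITION & SPEC =====
def Spec_recebeA (a : String) (out : String) : Prop := out = recebeA_alt a
instance (a : String) (out : String) : Decidable (Spec_recebeA a out) := by unfold Spec_recebeA; infer_instance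

-- ===== CLAIM (what is proved, stated in full; the proofs are below) =====
def Claim_equal_recebeA : Prop := ∀ (a : String), Dom_recebeA a → Spec_recebeA a (recebeA a)

-- ===== LEMMAS AND PROOFS =====

-- the common specification: every 'a' is immediately followed by two 'b's
def GoodAt (l : List Char) : Prop :=
  ∀ i : Nat, l[i]? = some 'a' → l[i + 1]? = some 'b' ∧ l[i + 2]? = some 'b'

-- per-index check of A's loop body
def chkA (l : List Char) (i : Int) : Bool :=
  if PySem.List.pyGet? l i = some 'a' then recebeB_port l i else true

lemma recebeA_loop_eq (s : List Char) (msg : String) (is : List Int) :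
    recebeA_loop s msg is = if is.all (chkA s) then none else some msg := by
  induction is with
  | nil => simp [recebeA_loop]
  | cons i rest ih =>
    simp only [recebeA_loop, List.all_cons, chkA]
    split_ifs with h1 h2 <;> simp_all

lemma chkA_true_iff (l : List Char) (k : Nat) :
    chkA l (k : Int) = true ↔
      (l[k]? = some 'a' → l[k + 1]? = some 'b' ∧ l[k + 2]? = some 'b') := by
  unfold chkA recebeB_port
  have h1 : ((k : Int) + 1) = ((k + 1 : Nat) : Int) := by push_cast; ring
  have h2 : ((k : Int) + 2) = ((k + 2 : Nat) : Int) := by push_cast; ring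
  rw [h1, h2]
  simp only [PySem.List.pyGet?_natCast]
  by_cases h : l[k]? = some 'a'
  · have hab : ¬ ('a' : Char) = 'b' := by decide
    simp only [h, hab, if_false, if_true, forall_const]
    split_ifs with hb1 hb2 <;> simp_all
  · simp [h]

lemma goodAt_iff_allA (l : List Char) :
    ((PySem.List.pyRange 0 (l.length : Int) 1).all (chkA l) = true) ↔ GoodAt l := by
  rw [List.all_eq_true]
  constructor
  · intro h i hi
    by_cases hlt : i < l.length
    · have hmem : (i : Int) ∈ PySem.List.pyRange 0 (l.length : Int) 1 := by
        rw [PySem.List.mem_pyRange_one]; omega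
      exact (chkA_true_iff l i).1 (h _ hmem) hi
    · simp [List.getElem?_eq_none (by omega : l.length ≤ i)] at hi
  · intro h x hx
    rw [PySem.List.mem_pyRange_one] at hx
    obtain ⟨k, rfl⟩ : ∃ k : Nat, x = (k : Int) := ⟨x.toNat, by omega⟩
    exact (chkA_true_iff l k).2 (h k)

-- GoodAt unfolds one character
lemma goodAt_cons (c : Char) (t : List Char) :
    GoodAt (c :: t) ↔ (c = 'a' → t[0]? = some 'b' ∧ t[1]? = some 'b') ∧ GoodAt t := by
  constructor
  · intro h
    refine ⟨fun hc => ?_, fun i hi => h (i + 1) (by simpa using hi)⟩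
    have := h 0 (by simpa using congrArg some hc)
    simpa using this
  · rintro ⟨hc, ht⟩ i hi
    cases i with
    | zero =>
      simp only [List.getElem?_cons_zero, Option.some.injEq] at hi
      simpa using hc hi
    | succ n =>
      simpa using ht n (by simpa using hi)

-- B's loop characterised: it accepts iff the next 'owe' chars are 'b' and the rest is good
def acceptsB (owe : Nat) (l : List Char) : Bool :=
  match recebeA_alt_loop owe l with
  | none => false
  | some o => o == 0

lemma acceptsB_iff (l : List Char) : ∀ owe : Nat,
    acceptsB owe l = true ↔
      (owe ≤ l.length ∧ l.take owe = List.replicate owe 'b' ∧ GoodAt (l.drop owe)) := by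
  induction l with
  | nil =>
    intro owe
    unfold acceptsB recebeA_alt_loop
    cases owe with
    | zero => simp [GoodAt]
    | succ o => simp
  | cons c t ih =>
    intro owe
    cases owe with
    | succ o =>
      unfold acceptsB recebeA_alt_loop
      by_cases hc : c = 'b'
      · subst hc
        simp only [if_pos (Nat.succ_pos o), Nat.succ_sub_one, if_true]
        have := ih o
        unfold acceptsB at this
        rw [this]
        simp [List.replicate_succ]
      · simp only [if_pos (Nat.succ_pos o), if_neg hc]
        simp [hc, List.replicate_succ]
    | zero =>
      unfold acceptsB recebeA_alt_loop
      simp only [gt_iff_lt, Nat.lt_irrefl, if_false]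
      by_cases hc : c = 'a'
      · subst hc
        simp only [if_true]
        have h2 := ih 2
        unfold acceptsB at h2
        rw [h2]
        simp only [Nat.zero_le, List.take_zero, List.drop_zero, true_and,
          List.replicate, goodAt_cons]
        constructor
        · rintro ⟨hlen, htake, hgood⟩
          match t, hlen with
          | x :: y :: u, _ =>
            simp at htake
            obtain ⟨hx, hy⟩ := htake
            subst hx; subst hy
            simp at hgood ⊢
            rw [goodAt_cons, goodAt_cons]
            have hb : ¬ ('b' : Char) = 'a' := by decide
            simp [hb, hgood]
        · rintro ⟨hhead, hgood⟩
          have hha := hhead trivial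
          match t, hha with
          | x :: y :: u, hha =>
            simp at hha
            obtain ⟨hx, hy⟩ := hha
            subst hx; subst hy
            rw [goodAt_cons, goodAt_cons] at hgood
            have hb : ¬ ('b' : Char) = 'a' := by decide
            simp [hb] at hgood
            simp [hgood]
      · simp only [if_neg hc]
        have h0 := ih 0
        unfold acceptsB at h0
        rw [h0]
        simp [goodAt_cons, hc]

lemma acceptsB_zero (l : List Char) : acceptsB 0 l = true ↔ GoodAt l := by
  rw [acceptsB_iff]
  simp [GoodAt]

-- ===== VERDICT (by name: the statement is the Claim_ definition above) =====
theorem recebeA_spec : Claim_equal_recebeA := by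
  intro a _
  unfold Spec_recebeA recebeA recebeA_alt
  rw [recebeA_loop_eq]
  have hA := goodAt_iff_allA a.toList
  have hB := acceptsB_zero a.toList
  unfold acceptsB at hB
  by_cases hg : GoodAt a.toList
  · rw [if_pos (hA.2 hg)]
    rcases hloop : recebeA_alt_loop 0 a.toList with _ | o
    · rw [hloop] at hB; simp at hB; exact absurd hg hB
    · rw [hloop] at hB
      have : (o == 0) = true := hB.2 hg
      simp at this
      simp [this]
  · rw [if_neg (fun h => hg (hA.1 h))]
    rcases hloop : recebeA_alt_loop 0 a.toList with _ | o
    · simp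
    · rw [hloop] at hB
      have : ¬ (o == 0) = true := fun h => hg (hB.1 h)
      simp at this
      simp [this]
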